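-- pv_equiv track=rewrite | github.com/Eugenestan/plannig | backend/app/jira_client.py | find_field_id
-- ===== SOURCE A (Python) =====
-- from typing import Any, Dict, List, Optional
--
-- def find_field_id(fields: List[dict], field_name: str) -> str:
--     target = field_name.strip().lower()
--     for f in fields:
--         if (f.get("name") or "").strip().lower() == target:
--             return f["id"]
--     for f in fields:
--         if target in ((f.get("name") or "").strip().lower()):
--             return f["id"]
--     raise RuntimeError(f"Поле '{field_name}' не найдено.")
-- ===== SOURCE B (Python) =====
-- def find_field_id(fields, field_name):
--     target = field_name.strip().lower()
--     fallback = None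
--     for f in fields:
--         name = (f.get("name") or "").strip().lower()
--         if name == target:
--             return f["id"]
--         if fallback is None and target in name:
--             fallback = f
--     if fallback is not None:
--         return fallback["id"]
--     raise RuntimeError(f"Поле '{field_name}' не найдено.")
-- ===== Notes on version B (the rewrite author's own statement) =====
-- stated objective: simpler
-- what changed: Replaced A's two full passes (exact scan, then substring scan) by a single pass that returns exact matches immediately and records only the first substring candidate in a fallback variable.
import Mathlib
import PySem

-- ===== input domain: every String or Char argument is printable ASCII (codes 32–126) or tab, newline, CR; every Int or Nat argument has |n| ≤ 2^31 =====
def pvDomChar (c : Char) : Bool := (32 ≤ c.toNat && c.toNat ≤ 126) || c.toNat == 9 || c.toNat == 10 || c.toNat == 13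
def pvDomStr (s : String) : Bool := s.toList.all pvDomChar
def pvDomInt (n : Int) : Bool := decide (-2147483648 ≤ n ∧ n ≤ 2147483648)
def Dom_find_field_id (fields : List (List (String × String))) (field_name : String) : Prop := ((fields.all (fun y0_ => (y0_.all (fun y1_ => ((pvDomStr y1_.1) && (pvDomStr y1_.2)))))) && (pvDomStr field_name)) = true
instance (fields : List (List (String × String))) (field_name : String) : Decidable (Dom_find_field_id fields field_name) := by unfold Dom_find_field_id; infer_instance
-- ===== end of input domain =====

-- B: single pass returning exact matches immediately and recording the first substring
-- candidate as a fallback, instead of A's two full passes; same results, same decomposition cost.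


-- dict lookup on the association list (first match, per the type convention)
def pvGet (f : List (String × String)) (k : String) : Option String :=
  (f.find? (fun kv => kv.1 == k)).map (fun kv => kv.2)

-- shared normalization: (f.get("name") or "").strip().lower()  (get returns None→""; "" or "" = "")
def pvNorm (f : List (String × String)) : String :=
  PySem.Str.lower (PySem.Str.strip ((pvGet f "name").getD ""))

-- f["id"]; the missing-key case (Python KeyError) is excluded by Pre_find_field_id
def pvId (f : List (String × String)) : String :=
  (pvGet f "id").getD ""

-- ===== PORT A =====
def find_field_id (fields : List (List (String × String))) (field_name : String) : String :=
  let target := PySem.Str.lower (PySem.Str.strip field_name)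
  match fields.find? (fun f => pvNorm f == target) with
  | some f => pvId f
  | none =>
    match fields.find? (fun f => PySem.Str.isIn target (pvNorm f)) with
    | some f => pvId f
    | none => ""   -- Python raises RuntimeError here; excluded by Pre_find_field_id

-- ===== PORT B =====
def pvLoopB (target : String) : List (List (String × String)) → Option (List (String × String)) → String
  | [], fallback =>
    match fallback with
    | some f => pvId f
    | none => ""   -- Python raises RuntimeError here; excluded by Pre_find_field_id
  | f :: rest, fallback =>
    let name := pvNorm f
    if name == target then pvId f
    else pvLoopB target rest
      (if fallback.isNone && PySem.Str.isIn target name then some f else fallback)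

def find_field_id_alt (fields : List (List (String × String))) (field_name : String) : String :=
  pvLoopB (PySem.Str.lower (PySem.Str.strip field_name)) fields none

-- ===== PRECONDITION & SPEC =====
-- Exactly the inputs on which the Python A returns: some field matches (exact, else substring),
-- and the first such field carries an "id" key (else A raises RuntimeError / KeyError).
def pvPreB (fields : List (List (String × String))) (field_name : String) : Bool :=
  let target := PySem.Str.lower (PySem.Str.strip field_name)
  match fields.find? (fun f => pvNorm f == target) with
  | some f => (pvGet f "id").isSome
  | none =>
    match fields.find? (fun f => PySem.Str.isIn target (pvNorm f)) with
    | some f => (pvGet f "id").isSome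
    | none => false

def Pre_find_field_id (fields : List (List (String × String))) (field_name : String) : Prop :=
  pvPreB fields field_name = true

instance (fields : List (List (String × String))) (field_name : String) : Decidable (Pre_find_field_id fields field_name) := by unfold Pre_find_field_id; infer_instance

def pvWitness_find_field_id : (List (List (String × String))) × String :=
  ([[("name", "Story Points"), ("id", "cf_10016")]], " story points ")

def Spec_find_field_id (fields : List (List (String × String))) (field_name : String) (out : String) : Prop := out = find_field_id_alt fields field_name
instance (fields : List (List (String × String))) (field_name : String) (out : String) : Decidable (Spec_find_field_id fields field_name out) := by unfold Spec_find_field_id; infer_instance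

-- ===== CLAIM (what is proved, stated in full; the proofs are below) =====
def Claim_equal_find_field_id : Prop := ∀ (fields : List (List (String × String))) (field_name : String), Dom_find_field_id fields field_name → Pre_find_field_id fields field_name → Spec_find_field_id fields field_name (find_field_id fields field_name)

-- ===== LEMMAS AND PROOFS =====

-- B's loop, characterized: exact match wins; else the fallback; else the first substring match.
lemma pvLoopB_eq (target : String) (fields : List (List (String × String)))
    (fb : Option (List (String × String))) :
    pvLoopB target fields fb =
      match fields.find? (fun f => pvNorm f == target) with
      | some f => pvId f
      | none =>
        match fb with
        | some g => pvId g
        | none =>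
          match fields.find? (fun f => PySem.Str.isIn target (pvNorm f)) with
          | some f => pvId f
          | none => "" := by
  induction fields generalizing fb with
  | nil => cases fb <;> simp [pvLoopB]
  | cons f rest ih =>
    by_cases hx : (pvNorm f == target) = true
    · simp [pvLoopB, hx]
    · rw [Bool.not_eq_true] at hx
      simp only [pvLoopB, hx, if_false, Bool.false_eq_true]
      rw [ih]
      cases hfe : rest.find? (fun g => pvNorm g == target) with
      | some g => simp [hx, hfe]
      | none =>
        cases fb with
        | some g => simp [hx, hfe]
        | none =>
          by_cases hs : PySem.Str.isIn target (pvNorm f) = true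
          · simp only [PySem.Str.isIn_eq] at hs
            simp [hx, hfe, hs]
          · rw [Bool.not_eq_true] at hs
            simp only [PySem.Str.isIn_eq] at hs
            simp [hx, hfe, hs]

-- ===== VERDICT (by name: the statement is the Claim_ definition above) =====
theorem find_field_id_spec : Claim_equal_find_field_id := by
  intro fields field_name _ _
  show find_field_id fields field_name = find_field_id_alt fields field_name
  rw [find_field_id_alt, pvLoopB_eq, find_field_id]
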